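-- pv_equiv track=rewrite | github.com/AkhobTornike/MAchineLearning | Week_1/main.py | work_thirteen
-- ===== SOURCE A (Python) =====
-- def work_thirteen(num1, num2):
--     list1 = []
--     list2 = []
--
--     for i in range(1, num1, 1):
--         if num1 % i == 0:
--             list1.append(i)
--
--     for j in range(1, num2, 1):
--         if num2 % j == 0:
--             list2.append(j)
--
--     return [element for element in list1 if element in list2]
-- ===== SOURCE B (Python) =====
-- def work_thirteen(num1, num2):
--     a, b = abs(num1), abs(num2)
--     while b:
--         a, b = b, a % b
--     # a is now gcd(|num1|, |num2|); every common divisor divides it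
--     hi = min(num1, num2)
--     return [d for d in range(1, hi) if a % d == 0]
-- ===== Notes on version B (the rewrite author's own statement) =====
-- stated objective: faster
-- what changed: B replaces A's two full divisor-collecting scans over range(1,num1) and range(1,num2) plus a quadratic list-membership intersection by one Euclid gcd loop followed by a single scan over range(1, min(num1,num2)) testing divisibility of the gcd.
import Mathlib
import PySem

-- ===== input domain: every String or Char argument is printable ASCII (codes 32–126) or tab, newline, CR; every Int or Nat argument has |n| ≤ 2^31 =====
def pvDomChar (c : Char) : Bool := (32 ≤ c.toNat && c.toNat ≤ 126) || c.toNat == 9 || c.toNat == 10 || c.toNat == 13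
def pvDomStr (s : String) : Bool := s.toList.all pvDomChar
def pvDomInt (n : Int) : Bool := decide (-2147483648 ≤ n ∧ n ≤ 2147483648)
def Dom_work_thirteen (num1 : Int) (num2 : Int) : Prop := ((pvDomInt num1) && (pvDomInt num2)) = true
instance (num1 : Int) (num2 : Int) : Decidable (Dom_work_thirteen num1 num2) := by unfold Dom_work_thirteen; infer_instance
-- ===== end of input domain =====

-- B replaces A's two full divisor scans plus quadratic list intersection by a Euclid gcd
-- and ONE scan for divisors of the gcd (objective: faster, one shorter pass and no
-- quadratic intersection).

-- ===== PORT A =====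
def work_thirteen (num1 : Int) (num2 : Int) : List Int :=
  let list1 := (PySem.List.pyRange 1 num1 1).foldl
    (fun acc i => if PySem.Int.mod num1 i == 0 then acc ++ [i] else acc) []
  let list2 := (PySem.List.pyRange 1 num2 1).foldl
    (fun acc j => if PySem.Int.mod num2 j == 0 then acc ++ [j] else acc) []
  list1.filter (fun element => decide (element ∈ list2))

-- ===== PORT B =====
-- Euclid's loop from Source B: while b: a, b = b, a % b   (both nonnegative after abs)
def euclidLoop (a b : Nat) : Nat :=
  if h : b = 0 then a else euclidLoop b (a % b)
termination_by b
decreasing_by exact Nat.mod_lt _ (Nat.pos_of_ne_zero h)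

def work_thirteen_alt (num1 : Int) (num2 : Int) : List Int :=
  let a : Int := (euclidLoop num1.natAbs num2.natAbs : Nat)
  let hi := min num1 num2
  (PySem.List.pyRange 1 hi 1).filter (fun d => PySem.Int.mod a d == 0)

-- ===== PRECONDITION & SPEC =====
def Spec_work_thirteen (num1 : Int) (num2 : Int) (out : List Int) : Prop := out = work_thirteen_alt num1 num2
instance (num1 : Int) (num2 : Int) (out : List Int) : Decidable (Spec_work_thirteen num1 num2 out) := by unfold Spec_work_thirteen; infer_instance

-- ===== CLAIM (what is proved, stated in full; the proofs are below) =====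
def Claim_equal_work_thirteen : Prop := ∀ (num1 : Int) (num2 : Int), Dom_work_thirteen num1 num2 → Spec_work_thirteen num1 num2 (work_thirteen num1 num2)

-- ===== LEMMAS AND PROOFS =====

lemma euclid_eq_gcd (b a : Nat) : euclidLoop a b = Nat.gcd b a := by
  induction b using Nat.strong_induction_on generalizing a with
  | _ b ih =>
    rw [euclidLoop]
    by_cases hb : b = 0
    · simp [hb]
    · rw [dif_neg hb, ih (a % b) (Nat.mod_lt _ (Nat.pos_of_ne_zero hb)) b,
        ← Nat.gcd_rec b a]

lemma dvd_g_iff (x n1 n2 : Int) :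
    x ∣ ((Nat.gcd n2.natAbs n1.natAbs : Nat) : Int) ↔ x ∣ n1 ∧ x ∣ n2 := by
  rw [← Int.natAbs_dvd_natAbs, ← Int.natAbs_dvd_natAbs (b := n1),
    ← Int.natAbs_dvd_natAbs (b := n2)]
  simp only [Int.natAbs_natCast]
  constructor
  · intro h
    exact ⟨h.trans (Nat.gcd_dvd_right _ _), h.trans (Nat.gcd_dvd_left _ _)⟩
  · rintro ⟨h1, h2⟩
    exact Nat.dvd_gcd h2 h1

lemma work_thirteen_eq (n1 n2 : Int) : work_thirteen n1 n2 = work_thirteen_alt n1 n2 := by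
  unfold work_thirteen work_thirteen_alt
  simp only [PySem.List.foldl_append_if_eq_filter, List.nil_append,
    euclid_eq_gcd]
  rw [List.filter_filter]
  by_cases h : n1 ≤ n2
  · rw [min_eq_left h]
    apply List.filter_congr
    intro x hx
    rw [PySem.List.mem_pyRange_one] at hx
    rw [Bool.eq_iff_iff]
    simp only [Bool.and_eq_true, decide_eq_true_eq, List.mem_filter,
      PySem.List.mem_pyRange_one, beq_iff_eq, PySem.Int.mod_eq_zero_iff_dvd,
      dvd_g_iff]
    constructor
    · rintro ⟨⟨⟨_, _⟩, h2⟩, h1⟩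
      exact ⟨h1, h2⟩
    · rintro ⟨h1, h2⟩
      exact ⟨⟨⟨hx.1, by omega⟩, h2⟩, h1⟩
  · rw [Int.not_le] at h
    rw [min_eq_right h.le]
    by_cases h2 : n2 ≤ 1
    · rw [PySem.List.pyRange_one_eq_nil h2]
      simp
    · rw [Int.not_le] at h2
      rw [PySem.List.pyRange_one_append 1 n2 n1 (by omega) (by omega),
        List.filter_append]
      have hnil : (PySem.List.pyRange n2 n1 1).filter
          (fun a => decide (a ∈ List.filter (fun j => PySem.Int.mod n2 j == 0)
            (PySem.List.pyRange 1 n2 1)) && (PySem.Int.mod n1 a == 0)) = [] := by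
        rw [List.filter_eq_nil_iff]
        intro x hx
        rw [PySem.List.mem_pyRange_one] at hx
        simp only [Bool.and_eq_true, decide_eq_true_eq, List.mem_filter,
          PySem.List.mem_pyRange_one, not_and]
        intro hmem
        omega
      rw [hnil, List.append_nil]
      apply List.filter_congr
      intro x hx
      rw [PySem.List.mem_pyRange_one] at hx
      rw [Bool.eq_iff_iff]
      simp only [Bool.and_eq_true, decide_eq_true_eq, List.mem_filter,
        PySem.List.mem_pyRange_one, beq_iff_eq, PySem.Int.mod_eq_zero_iff_dvd,
        dvd_g_iff]
      constructor
      · rintro ⟨⟨⟨_, _⟩, h2'⟩, h1⟩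
        exact ⟨h1, h2'⟩
      · rintro ⟨h1, h2'⟩
        exact ⟨⟨⟨hx.1, hx.2⟩, h2'⟩, h1⟩

-- ===== VERDICT (by name: the statement is the Claim_ definition above) =====
theorem work_thirteen_spec : Claim_equal_work_thirteen := by
  intro n1 n2 _
  exact work_thirteen_eq n1 n2
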